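-- pv_equiv track=rewrite | github.com/Valitar/casino | blackjack.py | suits
-- ===== SOURCE A (Python) =====
-- def suits(number_of_decks):
-- 	card_list = 'A', '2', '3', '4', '5', '6', '7', '8', '9', '10', 'J', 'Q', 'K'
-- 	hearts = '_H'
-- 	clubs = '_C'
-- 	diamonds = '_D'
-- 	spades = '_S'
-- 	count = 0
-- 	deck = []
-- 	while count < number_of_decks:
-- 		for i in card_list:
-- 			deck.append(i + hearts)
-- 		for i in card_list:
-- 			deck.append(i + clubs)
-- 		for i in card_list:
-- 			deck.append(i + diamonds)
-- 		for i in card_list: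
-- 			deck.append(i + spades)
-- 		count = count + 1
-- 	return deck
-- ===== SOURCE B (Python) =====
-- def suits(number_of_decks):
-- 	ranks = ('A', '2', '3', '4', '5', '6', '7', '8', '9', '10', 'J', 'Q', 'K')
-- 	single = [r + s for s in ('_H', '_C', '_D', '_S') for r in ranks]
-- 	return single * max(number_of_decks, 0)
-- ===== Notes on version B (the rewrite author's own statement) =====
-- stated objective: simpler
-- what changed: B builds a single full deck once via one comprehension and replicates it with list multiplication, instead of A's while-loop that rebuilds every card in four separate for-loops per deck.
import Mathlib
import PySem

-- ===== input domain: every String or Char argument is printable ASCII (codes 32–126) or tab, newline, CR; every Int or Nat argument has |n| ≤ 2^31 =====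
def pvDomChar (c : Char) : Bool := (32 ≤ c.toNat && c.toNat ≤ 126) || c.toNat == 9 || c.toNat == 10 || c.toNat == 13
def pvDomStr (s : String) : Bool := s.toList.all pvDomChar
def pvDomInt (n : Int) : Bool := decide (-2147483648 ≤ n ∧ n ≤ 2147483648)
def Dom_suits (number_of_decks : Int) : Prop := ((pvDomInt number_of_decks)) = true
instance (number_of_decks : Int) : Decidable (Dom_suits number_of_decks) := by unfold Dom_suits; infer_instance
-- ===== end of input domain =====

-- B precomputes one full deck with a comprehension and replicates it; same values, simpler decomposition.

-- ===== PORT A =====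
def suitsCardList : List String :=
  ["A", "2", "3", "4", "5", "6", "7", "8", "9", "10", "J", "Q", "K"]

-- the while loop: while count < number_of_decks, append the four suit passes, count += 1
def suitsLoop (number_of_decks : Int) (count : Int) (deck : List String) : List String :=
  if count < number_of_decks then
    suitsLoop number_of_decks (count + 1)
      ((((deck
        ++ suitsCardList.map (fun i => i ++ "_H"))
        ++ suitsCardList.map (fun i => i ++ "_C"))
        ++ suitsCardList.map (fun i => i ++ "_D"))
        ++ suitsCardList.map (fun i => i ++ "_S"))
  else deck
termination_by (number_of_decks - count).toNat
decreasing_by omega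

def suits (number_of_decks : Int) : List String :=
  suitsLoop number_of_decks 0 []

-- ===== PORT B =====
def suitsSingle : List String :=
  (["_H", "_C", "_D", "_S"].flatMap fun s => suitsCardList.map (fun r => r ++ s))

def suits_alt (number_of_decks : Int) : List String :=
  (List.replicate (max number_of_decks 0).toNat suitsSingle).flatten

-- ===== PRECONDITION & SPEC =====
def Spec_suits (number_of_decks : Int) (out : List String) : Prop := out = suits_alt number_of_decks
instance (number_of_decks : Int) (out : List String) : Decidable (Spec_suits number_of_decks out) := by unfold Spec_suits; infer_instance

-- ===== CLAIM (what is proved, stated in full; the proofs are below) =====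
def Claim_equal_suits : Prop := ∀ (number_of_decks : Int), Dom_suits number_of_decks → Spec_suits number_of_decks (suits number_of_decks)

-- ===== LEMMAS AND PROOFS =====

theorem suitsLoop_eq (n c : Int) (deck : List String) :
    suitsLoop n c deck = deck ++ (List.replicate (n - c).toNat suitsSingle).flatten := by
  by_cases h : c < n
  · rw [suitsLoop]
    simp only [h, if_pos]
    rw [suitsLoop_eq n (c + 1)]
    have hk : (n - c).toNat = (n - (c + 1)).toNat + 1 := by omega
    rw [hk, List.replicate_succ, List.flatten_cons]
    simp [suitsSingle, suitsCardList, List.flatMap]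
  · rw [suitsLoop]
    simp only [h, if_neg, not_false_iff]
    have : (n - c).toNat = 0 := by omega
    simp [this]
termination_by (n - c).toNat
decreasing_by omega

-- ===== VERDICT (by name: the statement is the Claim_ definition above) =====
theorem suits_spec : Claim_equal_suits := by
  intro n _
  show suits n = suits_alt n
  rw [suits, suits_alt, suitsLoop_eq]
  have h1 : (n - 0).toNat = n.toNat := by omega
  have h2 : (max n 0).toNat = n.toNat := by omega
  rw [h1, h2, List.nil_append]
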